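-- pv_equiv track=rewrite | github.com/nathannorthcutt/jlsm | .spec/_migration/scripts/04-rewrite-annotations.py | resolve_annotation
-- ===== SOURCE A (Python) =====
-- def resolve_annotation(feature, rns_str, table, dropped):
--     """Resolve a single @spec FXX.R1[,R2,...] occurrence.
--
--     Returns: (by_dest, unresolved, dropped_rns)
--       - by_dest: {destination: [final_rns]} for resolvable RNs
--       - unresolved: list of FXX.RN with no mapping (real errors)
--       - dropped_rns: list of FXX.RN that were intentionally dropped during migration
--     """
--     rns = rns_str.split(",")
--     by_dest = {}
--     unresolved = []
--     dropped_rns = []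
--     for rn in rns:
--         key = f"{feature}.{rn}"
--         if key in dropped:
--             dropped_rns.append(key)
--             continue
--         entry = table.get(key)
--         if not entry:
--             unresolved.append(key)
--             continue
--         dest = entry["destination"]
--         by_dest.setdefault(dest, []).append(entry["final_rn"])
--     return by_dest, unresolved, dropped_rns
-- ===== SOURCE B (Python) =====
-- def resolve_annotation(feature, rns_str, table, dropped):
--     """Multi-pass decomposition: build the key list once, then classify by
--     three independent filters and group the resolved entries at the end."""
--     keys = [f"{feature}.{rn}" for rn in rns_str.split(",")]
--     dropped_rns = [k for k in keys if k in dropped]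
--     unresolved = [k for k in keys if k not in dropped and not table.get(k)]
--     resolved = [table[k] for k in keys if k not in dropped and table.get(k)]
--     by_dest = {}
--     for entry in resolved:
--         by_dest.setdefault(entry["destination"], []).append(entry["final_rn"])
--     return by_dest, unresolved, dropped_rns
-- ===== Notes on version B (the rewrite author's own statement) =====
-- stated objective: alternative
-- what changed: The single classifying loop with three interleaved accumulators is replaced by independent passes: one key-building map, two filter comprehensions for dropped/unresolved, and a final grouping loop over only the resolved entries.
import Mathlib
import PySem

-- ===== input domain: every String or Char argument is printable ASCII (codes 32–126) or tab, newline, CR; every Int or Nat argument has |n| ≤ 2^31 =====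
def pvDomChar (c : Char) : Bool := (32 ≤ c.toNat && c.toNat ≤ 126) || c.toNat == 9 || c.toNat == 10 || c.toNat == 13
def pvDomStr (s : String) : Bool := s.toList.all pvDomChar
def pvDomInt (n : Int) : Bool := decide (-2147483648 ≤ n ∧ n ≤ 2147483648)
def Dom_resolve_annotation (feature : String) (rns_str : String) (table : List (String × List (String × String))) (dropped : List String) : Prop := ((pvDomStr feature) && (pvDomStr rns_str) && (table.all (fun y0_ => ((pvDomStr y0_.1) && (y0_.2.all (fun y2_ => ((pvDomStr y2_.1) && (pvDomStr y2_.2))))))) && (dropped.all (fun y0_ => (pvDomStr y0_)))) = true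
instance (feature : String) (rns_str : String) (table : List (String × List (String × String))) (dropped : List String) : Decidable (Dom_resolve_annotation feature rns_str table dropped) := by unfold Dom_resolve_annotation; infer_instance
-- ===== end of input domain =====

-- ONE-LINE SUMMARY: B replaces A's single classifying loop by a key-building map,
-- two filters (dropped / unresolved) and a grouping fold over only the resolved entries.

-- dict.get on an association list (first match), shared lookup primitive of both ports
def pvGet {α : Type} (t : List (String × α)) (k : String) : Option α :=
  (t.find? (fun p => p.1 == k)).map (·.2)

-- ===== PORT A =====
-- A's single loop body: dropped-check, falsy-entry check, setdefault-append (via Dict.modify)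
def pvStepA (feature : String) (table : List (String × List (String × String))) (dropped : List String)
    (st : PySem.Dict String (List String) × List String × List String) (rn : String) :
    PySem.Dict String (List String) × List String × List String :=
  let key := feature ++ "." ++ rn
  if dropped.contains key then
    (st.1, st.2.1, st.2.2 ++ [key])
  else
    match pvGet table key with
    | none => (st.1, st.2.1 ++ [key], st.2.2)
    | some entry =>
      if entry = [] then (st.1, st.2.1 ++ [key], st.2.2)
      else
        let dest := (pvGet entry "destination").getD ""
        (st.1.modify dest [] (fun l => l ++ [(pvGet entry "final_rn").getD ""]), st.2.1, st.2.2)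

def resolve_annotation (feature : String) (rns_str : String) (table : List (String × List (String × String))) (dropped : List String) : (List (String × List String)) × List String × List String :=
  let rns := ((PySem.Str.split? rns_str ",").getD [])
  let res := rns.foldl (pvStepA feature table dropped) (PySem.Dict.empty, [], [])
  (res.1.items, res.2.1, res.2.2)

-- ===== PORT B =====
-- B's grouping step over an already-resolved entry
def pvStepB (d : PySem.Dict String (List String)) (entry : List (String × String)) :
    PySem.Dict String (List String) :=
  d.modify ((pvGet entry "destination").getD "") [] (fun l => l ++ [(pvGet entry "final_rn").getD ""])

def resolve_annotation_alt (feature : String) (rns_str : String) (table : List (String × List (String × String))) (dropped : List String) : (List (String × List String)) × List String × List String :=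
  let keys := (((PySem.Str.split? rns_str ",").getD [])).map (fun rn => feature ++ "." ++ rn)
  let dropped_rns := keys.filter (fun k => dropped.contains k)
  let unresolved := keys.filter (fun k => !dropped.contains k && ((pvGet table k).getD []).isEmpty)
  let resolved := (keys.filter (fun k => !dropped.contains k && !((pvGet table k).getD []).isEmpty)).map (fun k => (pvGet table k).getD [])
  let by_dest := resolved.foldl pvStepB PySem.Dict.empty
  (by_dest.items, unresolved, dropped_rns)

-- ===== PRECONDITION & SPEC =====
-- Pre_ excludes exactly the inputs where Python A raises KeyError: a looked-up,
-- non-dropped, non-empty table entry lacking the "destination" or "final_rn" key.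
def Pre_resolve_annotation (feature : String) (rns_str : String) (table : List (String × List (String × String))) (dropped : List String) : Prop :=
  ∀ rn ∈ ((PySem.Str.split? rns_str ",").getD []),
    let key := feature ++ "." ++ rn
    let entry := (pvGet table key).getD []
    dropped.contains key = true ∨ entry = [] ∨
      ((pvGet entry "destination").isSome ∧ (pvGet entry "final_rn").isSome)
instance (feature : String) (rns_str : String) (table : List (String × List (String × String))) (dropped : List String) : Decidable (Pre_resolve_annotation feature rns_str table dropped) := by unfold Pre_resolve_annotation; infer_instance

def pvWitness_resolve_annotation : String × String × (List (String × List (String × String))) × List String :=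
  ("F1", "R1,R2,R3", [("F1.R1", [("destination", "d"), ("final_rn", "A1")]), ("F1.R2", [])], ["F1.R3"])

def Spec_resolve_annotation (feature : String) (rns_str : String) (table : List (String × List (String × String))) (dropped : List String) (out : (List (String × List String)) × List String × List String) : Prop := out = resolve_annotation_alt feature rns_str table dropped
instance (feature : String) (rns_str : String) (table : List (String × List (String × String))) (dropped : List String) (out : (List (String × List String)) × List String × List String) : Decidable (Spec_resolve_annotation feature rns_str table dropped out) := by unfold Spec_resolve_annotation; infer_instance

-- ===== CLAIM (what is proved, stated in full; the proofs are below) =====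
def Claim_equal_resolve_annotation : Prop := ∀ (feature : String) (rns_str : String) (table : List (String × List (String × String))) (dropped : List String), Dom_resolve_annotation feature rns_str table dropped → Pre_resolve_annotation feature rns_str table dropped → Spec_resolve_annotation feature rns_str table dropped (resolve_annotation feature rns_str table dropped)

-- ===== LEMMAS AND PROOFS =====

-- A's fold over the raw rn list equals B's three passes, for any starting accumulators.
theorem pvLoop_eq (feature : String) (table : List (String × List (String × String)))
    (dropped : List String) :
    ∀ (l : List String) (d : PySem.Dict String (List String)) (u dr : List String),
      l.foldl (pvStepA feature table dropped) (d, u, dr) =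
        ( (((l.map (fun rn => feature ++ "." ++ rn)).filter
              (fun k => !dropped.contains k && !((pvGet table k).getD []).isEmpty)).map
              (fun k => (pvGet table k).getD [])).foldl pvStepB d,
          u ++ (l.map (fun rn => feature ++ "." ++ rn)).filter
              (fun k => !dropped.contains k && ((pvGet table k).getD []).isEmpty),
          dr ++ (l.map (fun rn => feature ++ "." ++ rn)).filter (fun k => dropped.contains k) ) := by
  intro l
  induction l with
  | nil => simp
  | cons rn t ih =>
    intro d u dr
    simp only [List.foldl_cons, List.map_cons, List.filter_cons]
    by_cases hdrop : dropped.contains (feature ++ "." ++ rn) = true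
    · simp only [pvStepA, hdrop, if_true]
      rw [ih]
      simp [List.append_assoc]
    · have hd : dropped.contains (feature ++ "." ++ rn) = false := by
        simpa using hdrop
      cases hget : pvGet table (feature ++ "." ++ rn) with
      | none =>
        simp only [pvStepA, hd, hget]
        rw [ih]
        simp [List.append_assoc]
      | some entry =>
        by_cases hent : entry = []
        · subst hent
          simp only [pvStepA, hd, hget]
          rw [ih]
          simp [List.append_assoc]
        · simp only [pvStepA, hd, hget, if_neg hent]
          rw [ih]
          have hne : ((pvGet table (feature ++ "." ++ rn)).getD []).isEmpty = false := by
            simp [hget, hent]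
          simp [hget, pvStepB, hent]

-- ===== VERDICT (by name: the statement is the Claim_ definition above) =====
theorem resolve_annotation_spec : Claim_equal_resolve_annotation := by
  intro feature rns_str table dropped _ _
  unfold Spec_resolve_annotation resolve_annotation resolve_annotation_alt
  dsimp only
  rw [pvLoop_eq]
  simp
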